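-- pv_equiv track=rewrite | github.com/bhaveenpandey/test | Cipher.py | pf_pair
-- ===== SOURCE A (Python) =====
-- def clean(t): return ''.join(c for c in t.upper() if c.isalpha())
--
-- def pf_pair(txt):
--     txt=clean(txt).replace('J','I'); p=[]; i=0
--     while i<len(txt):
--         a=txt[i]; b=txt[i+1] if i+1<len(txt) else 'X'
--         if a==b: b='X'; i+=1
--         else: i+=2
--         p.append((a,b))
--     return p
-- ===== SOURCE B (Python) =====
-- def pf_pair(txt):
--     out = []
--     pend = None
--     for c in (x for x in txt.upper() if x.isalpha()):
--         if c == 'J':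
--             c = 'I'
--         if pend is None:
--             pend = c
--         elif pend == c:
--             out.append((pend, 'X'))
--             pend = c
--         else:
--             out.append((pend, c))
--             pend = None
--     if pend is not None:
--         out.append((pend, 'X'))
--     return out
-- ===== Notes on version B (the rewrite author's own statement) =====
-- stated objective: alternative
-- what changed: A walks the pre-cleaned string by index with lookahead (txt[i], txt[i+1]) and ad-hoc step size; B is a single streaming state machine over the raw characters (filter, uppercase and J->I applied per character on the fly) that keeps one pending letter as its state and never indexes or looks ahead, flushing a final ('p','X') pair at the end. (fused single pass avoids building the intermediate cleaned/replaced string and per-step indexing, a constant-factor win)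
import Mathlib
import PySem

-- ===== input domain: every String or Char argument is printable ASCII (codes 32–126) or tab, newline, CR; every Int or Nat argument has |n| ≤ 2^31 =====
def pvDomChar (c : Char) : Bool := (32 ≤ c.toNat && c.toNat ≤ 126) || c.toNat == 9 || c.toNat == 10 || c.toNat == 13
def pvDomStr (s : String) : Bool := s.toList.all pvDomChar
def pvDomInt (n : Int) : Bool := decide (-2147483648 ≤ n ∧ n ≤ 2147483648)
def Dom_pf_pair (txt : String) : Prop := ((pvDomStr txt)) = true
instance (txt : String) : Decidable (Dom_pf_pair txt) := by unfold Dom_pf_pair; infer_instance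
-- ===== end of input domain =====

-- B replaces A's index-walking lookahead loop with a single streaming state-machine pass
-- (a pending-letter accumulator, J→I done per character, no intermediate cleaned string); alternative decomposition, same cost.

-- ===== PORT A =====
-- clean(t) = ''.join(c for c in t.upper() if c.isalpha()), then .replace('J','I')
def pfCleanA (txt : String) : List Char :=
  PySem.Chars.replace ((PySem.Chars.upper txt.toList).filter PySem.Chars.isalpha) ['J'] ['I']

-- the while loop of A: a = txt[i]; b = txt[i+1] if i+1<len else 'X'; if a==b: b='X'; i+=1 else i+=2; append (a,b)
def pfLoopA : List Char → List (String × String)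
  | [] => []
  | [a] =>
      let b := 'X'
      if a == b then [(String.ofList [a], String.ofList ['X'])]
      else [(String.ofList [a], String.ofList [b])]
  | a :: b :: rest =>
      if a == b then (String.ofList [a], String.ofList ['X']) :: pfLoopA (b :: rest)
      else (String.ofList [a], String.ofList [b]) :: pfLoopA rest

def pf_pair (txt : String) : List (String × String) := pfLoopA (pfCleanA txt)

-- ===== PORT B =====
-- one iteration of B's for-loop: state = (pending letter or none, output so far); c := 'I' if the char is 'J'
def pfStepB (st : Option Char × List (String × String)) (c0 : Char) :
    Option Char × List (String × String) :=
  let c := if c0 == 'J' then 'I' else c0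
  match st.1 with
  | none => (some c, st.2)
  | some p =>
      if p == c then (some c, st.2 ++ [(String.ofList [p], String.ofList ['X'])])
      else (none, st.2 ++ [(String.ofList [p], String.ofList [c])])

def pf_pair_alt (txt : String) : List (String × String) :=
  let st := ((PySem.Chars.upper txt.toList).filter PySem.Chars.isalpha).foldl pfStepB (none, [])
  match st.1 with
  | some p => st.2 ++ [(String.ofList [p], String.ofList ['X'])]
  | none => st.2

-- ===== PRECONDITION & SPEC =====
def Spec_pf_pair (txt : String) (out : List (String × String)) : Prop := out = pf_pair_alt txt
instance (txt : String) (out : List (String × String)) : Decidable (Spec_pf_pair txt out) := by unfold Spec_pf_pair; infer_instance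

-- ===== CLAIM (what is proved, stated in full; the proofs are below) =====
def Claim_equal_pf_pair : Prop := ∀ (txt : String), Dom_pf_pair txt → Spec_pf_pair txt (pf_pair txt)

-- ===== LEMMAS AND PROOFS =====

-- J→I on one character
def pfRepJ (c : Char) : Char := if c == 'J' then 'I' else c

-- B's step without the per-character substitution (proof helper)
def pfStepPlain (st : Option Char × List (String × String)) (c : Char) :
    Option Char × List (String × String) :=
  match st.1 with
  | none => (some c, st.2)
  | some p =>
      if p == c then (some c, st.2 ++ [(String.ofList [p], String.ofList ['X'])])
      else (none, st.2 ++ [(String.ofList [p], String.ofList [c])])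

-- finish of B's fold
def pfFinish (st : Option Char × List (String × String)) : List (String × String) :=
  match st.1 with
  | some p => st.2 ++ [(String.ofList [p], String.ofList ['X'])]
  | none => st.2

-- A's whole-string replace('J','I') is the character map pfRepJ
theorem replace_go_single :
    ∀ (fuel : Nat) (l acc : List Char), l.length ≤ fuel →
      PySem.Chars.replace.go ['J'] ['I'] fuel l acc = acc.reverse ++ l.map pfRepJ := by
  intro fuel
  induction fuel with
  | zero =>
      intro l acc h
      have : l = [] := List.length_eq_zero_iff.mp (Nat.le_zero.mp h)
      subst this; simp [PySem.Chars.replace.go]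
  | succ n ih =>
      intro l acc h
      cases l with
      | nil => simp [PySem.Chars.replace.go]
      | cons c t =>
          by_cases hc : c = 'J'
          · subst hc
            have hpre : List.isPrefixOf ['J'] ('J' :: t) = true := by
              simp [List.isPrefixOf]
            rw [PySem.Chars.replace.go]
            simp only [hpre, if_true]
            rw [show List.drop (['J'].length) ('J' :: t) = t from rfl,
                show (['I'].reverse ++ acc) = 'I' :: acc from rfl]
            rw [ih t ('I' :: acc) (by simpa using Nat.le_of_succ_le_succ h)]
            simp [pfRepJ]
          · have hpre : List.isPrefixOf ['J'] (c :: t) = false := by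
              simp [List.isPrefixOf]; exact fun hd => absurd hd.symm hc
            rw [PySem.Chars.replace.go]
            simp only [hpre]
            rw [ih t (c :: acc) (by simpa using Nat.le_of_succ_le_succ h)]
            simp [pfRepJ, hc]

theorem replace_single (l : List Char) :
    PySem.Chars.replace l ['J'] ['I'] = l.map pfRepJ := by
  rw [PySem.Chars.replace]
  simp only [List.isEmpty_cons, if_neg, Bool.false_eq_true, not_false_iff]
  exact replace_go_single l.length l [] (le_refl _)

-- the fold from a pending state computes A's loop from that letter on
theorem pfFold_some :
    ∀ (n : Nat) (l : List Char), l.length ≤ n → ∀ (a : Char) (out : List (String × String)),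
      pfFinish (l.foldl pfStepPlain (some a, out)) = out ++ pfLoopA (a :: l) := by
  intro n
  induction n with
  | zero =>
      intro l h a out
      have : l = [] := List.length_eq_zero_iff.mp (Nat.le_zero.mp h)
      subst this
      by_cases ha : a = 'X' <;> simp [pfFinish, pfLoopA, ha]
  | succ n ih =>
      intro l h a out
      cases l with
      | nil => by_cases ha : a = 'X' <;> simp [pfFinish, pfLoopA, ha]
      | cons b r =>
          by_cases hab : a = b
          · subst hab
            simp only [List.foldl_cons, pfStepPlain, beq_self_eq_true, if_true]
            rw [ih r (by simpa using Nat.le_of_succ_le_succ h) a (out ++ [(String.ofList [a], String.ofList ['X'])])]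
            simp [pfLoopA]
          · have hne : (a == b) = false := by simp [hab]
            simp only [List.foldl_cons, pfStepPlain, hne, Bool.false_eq_true, if_false]
            cases r with
            | nil => simp [pfFinish, pfLoopA, hne]
            | cons c r2 =>
                simp only [List.foldl_cons, pfStepPlain]
                rw [ih r2 (by simp at h ⊢; omega) c (out ++ [(String.ofList [a], String.ofList [b])])]
                simp [pfLoopA, hne]

theorem pfFold_eq_loopA (l : List Char) :
    pfFinish (l.foldl pfStepPlain (none, [])) = pfLoopA l := by
  cases l with
  | nil => rfl
  | cons a r =>
      simp only [List.foldl_cons, pfStepPlain]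
      simpa using pfFold_some r.length r (le_refl _) a []

-- ===== VERDICT (by name: the statement is the Claim_ definition above) =====
theorem pf_pair_spec : Claim_equal_pf_pair := by
  intro txt _
  unfold Spec_pf_pair pf_pair pf_pair_alt pfCleanA
  show pfLoopA _ = pfFinish _
  rw [replace_single]
  rw [show ∀ st l, List.foldl pfStepB st l = List.foldl pfStepPlain st (l.map pfRepJ) from
    fun st l => by rw [List.foldl_map]; rfl]
  exact (pfFold_eq_loopA _).symm
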